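-- pv_equiv track=rewrite | github.com/ling0322/pycrf | crf_seg.py | _tag_to_seg
-- ===== SOURCE A (Python) =====
-- def _tag_to_seg(text, tag):
--     result = []
--     word = ''
--     for i, ch in enumerate(text):
--         word += ch
--         if tag[i] in ('E', 'S'):
--             result.append(word)
--             word = ''
--     result.append(word)
--     return result
-- ===== SOURCE B (Python) =====
-- def _tag_to_seg(text, tag):
--     cuts = [0] + [i + 1 for i in range(len(text)) if tag[i] in ('E', 'S')] + [len(text)]
--     return [text[cuts[j]:cuts[j + 1]] for j in range(len(cuts) - 1)]
-- ===== Notes on version B (the rewrite author's own statement) =====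
-- stated objective: alternative
-- what changed: B computes the list of cut points (after each 'E'/'S' tag) in one pass and then emits words by slicing text between consecutive cuts, instead of A's single pass accumulating characters into a growing word; Pre_ excludes inputs where tag is shorter than text, on which both programs raise IndexError.
import Mathlib
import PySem

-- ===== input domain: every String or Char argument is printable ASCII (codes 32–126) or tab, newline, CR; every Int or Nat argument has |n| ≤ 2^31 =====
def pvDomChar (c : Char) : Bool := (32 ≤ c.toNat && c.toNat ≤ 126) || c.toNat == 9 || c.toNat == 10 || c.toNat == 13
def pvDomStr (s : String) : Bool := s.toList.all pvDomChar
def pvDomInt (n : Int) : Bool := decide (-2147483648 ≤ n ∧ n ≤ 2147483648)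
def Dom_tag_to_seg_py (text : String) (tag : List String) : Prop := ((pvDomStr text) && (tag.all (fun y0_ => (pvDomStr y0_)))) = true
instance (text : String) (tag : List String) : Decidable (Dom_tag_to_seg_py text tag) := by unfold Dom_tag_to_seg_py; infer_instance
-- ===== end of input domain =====

-- B replaces A's single pass that accumulates characters into a growing word by a
-- two-pass decomposition: first compute the cut points, then slice between consecutive cuts
-- (objective: alternative; same O(n) cost).

-- ===== PORT A =====
-- tag[i] is ported as pyGetD with default ""; Pre_ guarantees the index is in range,
-- so the default is never used on admitted inputs.
def tag_to_seg_py (text : String) (tag : List String) : List String :=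
  let st := (PySem.List.enumerate text.toList 0).foldl
    (fun (p : List String × String) ic =>
      let word := p.2.push ic.2
      if PySem.List.pyGetD tag ic.1 "" == "E" || PySem.List.pyGetD tag ic.1 "" == "S" then
        (p.1 ++ [word], "")
      else
        (p.1, word))
    ([], "")
  st.1 ++ [st.2]

-- ===== PORT B =====
-- text[a:b] is ported via PySem.List.slice on the character list (exact on all slices here).
def tag_to_seg_py_alt (text : String) (tag : List String) : List String :=
  let cs := text.toList
  let cuts : List Int :=
    0 :: (((PySem.List.pyRange 0 (cs.length : Int) 1).filter
            (fun i => PySem.List.pyGetD tag i "" == "E" || PySem.List.pyGetD tag i "" == "S")).map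
            (fun i => i + 1)) ++ [(cs.length : Int)]
  (PySem.List.pyRange 0 ((cuts.length : Int) - 1) 1).map
    (fun j => String.ofList (PySem.List.slice cs (some (PySem.List.pyGetD cuts j 0))
                                                 (some (PySem.List.pyGetD cuts (j + 1) 0))))

-- ===== PRECONDITION & SPEC =====
-- Pre_ excludes inputs whose tag list is shorter than text: there Python A (and Python B)
-- raises IndexError on tag[i].
def Pre_tag_to_seg_py (text : String) (tag : List String) : Prop :=
  text.toList.length ≤ tag.length
instance (text : String) (tag : List String) : Decidable (Pre_tag_to_seg_py text tag) := by
  unfold Pre_tag_to_seg_py; infer_instance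
def pvWitness_tag_to_seg_py : String × List String := ("abc", ["B", "E", "S"])

def Spec_tag_to_seg_py (text : String) (tag : List String) (out : List String) : Prop := out = tag_to_seg_py_alt text tag
instance (text : String) (tag : List String) (out : List String) : Decidable (Spec_tag_to_seg_py text tag out) := by unfold Spec_tag_to_seg_py; infer_instance

-- ===== CLAIM (what is proved, stated in full; the proofs are below) =====
def Claim_equal_tag_to_seg_py : Prop := ∀ (text : String) (tag : List String), Dom_tag_to_seg_py text tag → Pre_tag_to_seg_py text tag → Spec_tag_to_seg_py text tag (tag_to_seg_py text tag)

-- ===== LEMMAS AND PROOFS =====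

-- Is position k a word end (tag 'E' or 'S')?
def segTag (tag : List String) (k : Nat) : Bool :=
  tag.getD k "" == "E" || tag.getD k "" == "S"

-- Reference segmentation: walk the remaining characters at absolute position k with
-- current partial word w.
def segGo (tag : List String) : List Char → Nat → List Char → List (List Char)
  | [], _, w => [w]
  | c :: cs, k, w =>
    if segTag tag k then (w ++ [c]) :: segGo tag cs (k + 1) []
    else segGo tag cs (k + 1) (w ++ [c])

-- String.ofList turns appending one character into String.push.
lemma ofList_append_singleton (w : String) (c : Char) :
    String.ofList (w.toList ++ [c]) = w.push c := by
  rw [← String.toList_push, String.ofList_toList]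

-- A's fold equals the reference segmentation.
lemma A_inv (tag : List String) : ∀ (cs : List Char) (k : Nat) (res : List String) (w : String),
    (let st := (PySem.List.enumerate cs (k : Int)).foldl
      (fun (p : List String × String) ic =>
        let word := p.2.push ic.2
        if PySem.List.pyGetD tag ic.1 "" == "E" || PySem.List.pyGetD tag ic.1 "" == "S" then
          (p.1 ++ [word], "")
        else
          (p.1, word))
      (res, w)
     st.1 ++ [st.2]) = res ++ (segGo tag cs k w.toList).map String.ofList := by
  intro cs
  induction cs with
  | nil =>
    intro k res w
    simp [PySem.List.enumerate_nil, segGo]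
  | cons c cs ih =>
    intro k res w
    rw [PySem.List.enumerate_cons]
    have hcast : (k : Int) + 1 = ((k + 1 : Nat) : Int) := by push_cast; ring
    simp only [List.foldl_cons, hcast, PySem.List.pyGetD_natCast, segGo, segTag]
    by_cases h : (tag.getD k "" == "E" || tag.getD k "" == "S") = true
    · simp only [h, if_pos]
      rw [ih (k + 1) (res ++ [w.push c]) ""]
      simp only [List.map_cons, ofList_append_singleton, String.toList_empty]
      simp [List.append_assoc]
    · simp only [h]
      simp only [Bool.not_eq_true] at h
      rw [if_neg (by simp), if_neg (by simp)]
      rw [ih (k + 1) res (w.push c)]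
      simp

-- Words formed by consecutive pairs from a cut list.
def pairWords (cs : List Char) : List Int → List String
  | a :: b :: rest =>
      String.ofList (PySem.List.slice cs (some a) (some b)) :: pairWords cs (b :: rest)
  | _ => []

-- Indexing consecutive pairs j, j+1 of a list equals the structural pair recursion.
lemma idx_pairs (cs : List Char) : ∀ (l : List Int) (x : Int),
    (List.range l.length).map (fun j =>
        String.ofList (PySem.List.slice cs (some ((x :: l).getD j 0))
                                           (some ((x :: l).getD (j + 1) 0))))
      = pairWords cs (x :: l) := by
  intro l
  induction l with
  | nil => intro x; simp [pairWords]
  | cons y l ih =>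
    intro x
    rw [List.length_cons, List.range_succ_eq_map, List.map_cons, List.map_map, pairWords,
      ← ih y]
    congr 1

-- The cut points strictly after position k.
def cutsFrom (tag : List String) (n k : Nat) : List Int :=
  ((List.range' k (n - k)).filter (segTag tag)).map (fun (i : Nat) => ((i : Int) + 1))

-- Appending the next character to a partial word, as slices.
lemma take_drop_snoc (cs : List Char) (j k : Nat) (hj : j ≤ k) (hk : k < cs.length) :
    (cs.drop j).take (k + 1 - j) = (cs.drop j).take (k - j) ++ [cs[k]] := by
  have h1 : k + 1 - j = (k - j) + 1 := by omega
  have h2 : k - j < (cs.drop j).length := by simp; omega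
  rw [h1, List.take_add_one, List.getElem?_eq_getElem h2]
  congr 1
  simp [List.getElem_drop]
  congr 1
  omega

-- Slicing between consecutive cuts equals the reference segmentation.
lemma pairWords_eq_segGo (tag : List String) (cs : List Char) :
    ∀ (m k j : Nat), m = cs.length - k → j ≤ k → k ≤ cs.length →
    pairWords cs ((j : Int) :: (cutsFrom tag cs.length k ++ [(cs.length : Int)]))
      = (segGo tag (cs.drop k) k ((cs.drop j).take (k - j))).map String.ofList := by
  intro m
  induction m with
  | zero =>
    intro k j hm hj hk
    have hkn : k = cs.length := by omega
    subst hkn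
    simp [cutsFrom, pairWords, segGo, PySem.List.slice_natCast]
  | succ m ih =>
    intro k j hm hj hk
    have hklt : k < cs.length := by omega
    have hrange : List.range' k (cs.length - k) = k :: List.range' (k + 1) (cs.length - (k + 1)) := by
      have : cs.length - k = (cs.length - (k + 1)) + 1 := by omega
      rw [this, List.range'_succ]
    have hdrop : cs.drop k = cs[k] :: cs.drop (k + 1) := List.drop_eq_getElem_cons hklt
    rw [hdrop]
    have hc1 : (k : Int) + 1 = ((k + 1 : Nat) : Int) := by push_cast; ring
    by_cases hb : segTag tag k = true
    · have hcuts : cutsFrom tag cs.length k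
          = ((k + 1 : Nat) : Int) :: cutsFrom tag cs.length (k + 1) := by
        simp only [cutsFrom, hrange, List.filter_cons, hb, if_pos, List.map_cons, hc1]
      rw [hcuts]
      simp only [List.cons_append, pairWords]
      rw [ih (k + 1) (k + 1) (by omega) (le_refl _) (by omega)]
      simp only [segGo]
      rw [if_pos hb]
      simp only [List.map_cons]
      congr 1
      · rw [PySem.List.slice_natCast, take_drop_snoc cs j k hj hklt]
      · simp
    · have hcuts : cutsFrom tag cs.length k = cutsFrom tag cs.length (k + 1) := by
        simp [cutsFrom, hrange, hb]
      rw [hcuts, ih (k + 1) j (by omega) (by omega) (by omega)]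
      simp only [segGo]
      rw [if_neg hb, take_drop_snoc cs j k hj hklt]

-- B's cut list is 0 :: cutsFrom 0 ++ [n].
lemma alt_eq_pairWords (text : String) (tag : List String) :
    tag_to_seg_py_alt text tag
      = pairWords text.toList ((0 : Int) ::
          (cutsFrom tag text.toList.length 0 ++ [(text.toList.length : Int)])) := by
  have hp : ∀ i : Nat,
      ((fun i => PySem.List.pyGetD tag i "" == "E" || PySem.List.pyGetD tag i "" == "S") ∘
        (fun k : Nat => (k : Int))) i = segTag tag i := by
    intro i
    simp [segTag, Function.comp, PySem.List.pyGetD_natCast]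
  have hfilter :
      ((PySem.List.pyRange 0 (text.toList.length : Int) 1).filter
          (fun i => PySem.List.pyGetD tag i "" == "E" || PySem.List.pyGetD tag i "" == "S")).map
          (fun i => i + 1)
        = cutsFrom tag text.toList.length 0 := by
    rw [show PySem.List.pyRange 0 ((text.toList.length : Nat) : Int) 1
          = PySem.List.pyRange 0 ((text.toList.length : Nat) : Int) from rfl,
      PySem.List.pyRange_zero_natCast, List.filter_map, List.map_map,
      List.filter_congr (fun x _ => hp x)]
    unfold cutsFrom
    rw [Nat.sub_zero, ← List.range_eq_range']
    apply List.map_congr_left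
    intro i _
    simp [Function.comp]
  simp only [tag_to_seg_py_alt]
  rw [hfilter]
  simp only [List.cons_append]
  set l : List Int := cutsFrom tag text.toList.length 0 ++ [(text.toList.length : Int)] with hl
  have hlen : ((((0 : Int) :: l).length : Int) - 1) = ((l.length : Nat) : Int) := by
    simp
  rw [hlen, PySem.List.pyRange_zero_natCast, List.map_map, ← idx_pairs text.toList l 0]
  apply List.map_congr_left
  intro j _
  have hc1 : ((j : Int) + 1) = ((j + 1 : Nat) : Int) := by push_cast; ring
  simp only [Function.comp, PySem.List.pyGetD_natCast, hc1]

-- ===== VERDICT (by name: the statement is the Claim_ definition above) =====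
theorem tag_to_seg_py_spec : Claim_equal_tag_to_seg_py := by
  intro text tag _ _
  unfold Spec_tag_to_seg_py
  have hA : tag_to_seg_py text tag
      = (segGo tag text.toList 0 ("" : String).toList).map String.ofList := by
    unfold tag_to_seg_py
    exact A_inv tag text.toList 0 [] ""
  have hB := alt_eq_pairWords text tag
  have hmain := pairWords_eq_segGo tag text.toList text.toList.length 0 0 (by omega) (le_refl _)
    (Nat.zero_le _)
  simp only [Nat.cast_zero, List.drop_zero, List.take_zero, Nat.sub_zero] at hmain
  simp only [String.toList_empty] at hA
  rw [hA, hB, hmain]
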